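-- pv_equiv track=rewrite | github.com/yssyss2323/Algorithm | 백준/Gold/1407. 2로 몇 번 나누어질까/2로 몇 번 나누어질까.py | func
-- ===== SOURCE A (Python) =====
-- def func(x):
--     cnt = x
--     lev = 0
--     while x // 2 > 0:
--         cnt += (x // 2) * (2 ** lev)
--         x //= 2
--         lev += 1
--     return cnt
-- ===== SOURCE B (Python) =====
-- def func(x):
--     # Recursive decomposition: R(x) = x - x//2 + 2*R(x//2), base R(x)=x when x//2 <= 0.
--     if x // 2 > 0:
--         return x - x // 2 + 2 * func(x // 2)
--     return x
-- ===== Notes on version B (the rewrite author's own statement) =====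
-- stated objective: alternative
-- what changed: Replaces A's flat while-loop accumulating (x//2)*2**lev per level with a recursion on x//2 using the identity R(x) = x - x//2 + 2*R(x//2).
import Mathlib
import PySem

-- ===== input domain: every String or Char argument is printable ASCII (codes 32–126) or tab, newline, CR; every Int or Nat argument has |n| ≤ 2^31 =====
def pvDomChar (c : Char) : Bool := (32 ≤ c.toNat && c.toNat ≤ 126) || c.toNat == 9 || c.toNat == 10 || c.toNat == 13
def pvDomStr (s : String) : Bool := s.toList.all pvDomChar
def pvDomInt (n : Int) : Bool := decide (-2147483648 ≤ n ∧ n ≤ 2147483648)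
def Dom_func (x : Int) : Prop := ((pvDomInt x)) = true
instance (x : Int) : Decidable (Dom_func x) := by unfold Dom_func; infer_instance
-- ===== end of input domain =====

-- B replaces A's flat accumulating loop with a one-level-per-call recursion on x//2 (alternative decomposition, same cost).

-- ===== PORT A =====
-- while loop of A: state (x, cnt, lev); lev only ever holds 0,1,2,… so it is carried as a Nat
def funcLoop (x cnt : Int) (lev : Nat) : Int :=
  if h : PySem.Int.floordiv x 2 > 0 then
    funcLoop (PySem.Int.floordiv x 2) (cnt + (PySem.Int.floordiv x 2) * (2 ^ lev)) (lev + 1)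
  else cnt
termination_by x.toNat
decreasing_by
  rw [PySem.Int.floordiv_eq_ediv_of_pos (by omega)] at *
  omega

def func (x : Int) : Int := funcLoop x x 0

-- ===== PORT B =====
def func_alt (x : Int) : Int :=
  if h : PySem.Int.floordiv x 2 > 0 then
    x - PySem.Int.floordiv x 2 + 2 * func_alt (PySem.Int.floordiv x 2)
  else x
termination_by x.toNat
decreasing_by
  rw [PySem.Int.floordiv_eq_ediv_of_pos (by omega)] at *
  omega

-- ===== PRECONDITION & SPEC =====
def Spec_func (x : Int) (out : Int) : Prop := out = func_alt x
instance (x : Int) (out : Int) : Decidable (Spec_func x out) := by unfold Spec_func; infer_instance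

-- ===== CLAIM (what is proved, stated in full; the proofs are below) =====
def Claim_equal_func : Prop := ∀ (x : Int), Dom_func x → Spec_func x (func x)

-- ===== LEMMAS AND PROOFS =====
-- Loop invariant: the loop returns cnt plus the alt-recursion's surplus, scaled by 2^lev.
theorem funcLoop_inv (x cnt : Int) (lev : Nat) :
    funcLoop x cnt lev = cnt + (func_alt x - x) * 2 ^ lev := by
  induction x, cnt, lev using funcLoop.induct with
  | case1 x cnt lev h ih =>
    rw [funcLoop, dif_pos h, ih]
    conv_rhs => rw [func_alt]
    rw [dif_pos h]
    ring
  | case2 x cnt lev h =>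
    rw [funcLoop, dif_neg h, func_alt, dif_neg h]
    ring

-- ===== VERDICT (by name: the statement is the Claim_ definition above) =====
theorem func_spec : Claim_equal_func := by
  intro x _
  show func x = func_alt x
  rw [func, funcLoop_inv]
  ring
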